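-- pv_equiv track=rewrite | github.com/yangjzjhon-coder/quant-lab | src/quant_lab/artifacts.py | _artifact_token
-- ===== SOURCE A (Python) =====
-- def _artifact_token(value: str) -> str:
--     chars: list[str] = []
--     for char in str(value).strip().lower():
--         if char.isalnum():
--             chars.append(char)
--         else:
--             chars.append("_")
--     token = "".join(chars).strip("_")
--     while "__" in token:
--         token = token.replace("__", "_")
--     return token
-- ===== SOURCE B (Python) =====
-- def _artifact_token(value: str) -> str:
--     # single pass: collect maximal alphanumeric runs, join them with "_"
--     words = []
--     current = []
--     for char in str(value).strip().lower():
--         if char.isalnum():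
--             current.append(char)
--         elif current:
--             words.append("".join(current))
--             current = []
--     if current:
--         words.append("".join(current))
--     return "_".join(words)
-- ===== Notes on version B (the rewrite author's own statement) =====
-- stated objective: alternative
-- what changed: replaces A's pipeline (map each char to itself or a separator, strip separators at both ends, repeatedly collapse doubled separators until none remain) with a single pass that collects the maximal alphanumeric runs and joins them with single separators
import Mathlib
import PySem

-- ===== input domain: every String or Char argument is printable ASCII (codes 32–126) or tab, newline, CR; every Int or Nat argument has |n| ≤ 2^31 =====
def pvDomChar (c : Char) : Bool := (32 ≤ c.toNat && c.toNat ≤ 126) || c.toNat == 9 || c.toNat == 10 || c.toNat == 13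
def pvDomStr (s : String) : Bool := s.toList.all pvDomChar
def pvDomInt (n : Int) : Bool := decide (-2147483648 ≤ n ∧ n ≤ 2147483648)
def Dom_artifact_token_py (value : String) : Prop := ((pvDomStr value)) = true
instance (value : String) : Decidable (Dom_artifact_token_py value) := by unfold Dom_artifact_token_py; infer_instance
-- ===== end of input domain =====

-- B replaces A's map-to-underscore + strip('_') + fixpoint replace('__','_') pipeline with a
-- single pass collecting the maximal alphanumeric runs and joining them with '_' (alternative algorithm, same value).

-- ===== PORT A =====
-- `pvRep` and the four lemmas below exist only so that A's `while "__" in token:` loop can be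
-- DEFINED (termination): `pvRep` is proved equal to token.replace("__","_"), which shrinks the token.
def pvRep : List Char → List Char
  | [] => []
  | [c] => [c]
  | a :: b :: t => if a = '_' ∧ b = '_' then '_' :: pvRep t else a :: pvRep (b :: t)

theorem pvRep_go_eq (fuel : Nat) : ∀ (l acc : List Char), l.length ≤ fuel →
    PySem.Chars.replace.go ['_','_'] ['_'] fuel l acc = acc.reverse ++ pvRep l := by
  induction fuel with
  | zero =>
    intro l acc h
    have : l = [] := List.eq_nil_of_length_eq_zero (by omega)
    subst this
    simp [PySem.Chars.replace.go, pvRep]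
  | succ n ih =>
    intro l acc h
    match l with
    | [] => simp [PySem.Chars.replace.go, pvRep]
    | [c] =>
      rw [PySem.Chars.replace.go]
      have hp : (['_','_'].isPrefixOf [c]) = false := by simp [List.isPrefixOf]
      simp only [hp, Bool.false_eq_true, if_false]
      rw [ih [] (c :: acc) (by simp)]
      simp [pvRep]
    | a :: b :: t =>
      rw [PySem.Chars.replace.go]
      by_cases hab : a = '_' ∧ b = '_'
      · obtain ⟨ha, hb⟩ := hab
        subst ha; subst hb
        have hp : (['_','_'].isPrefixOf ('_' :: '_' :: t)) = true := by simp [List.isPrefixOf]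
        simp only [hp, if_true]
        have ht : t.length ≤ n := by simp at h; omega
        rw [show List.drop ['_','_'].length ('_'::'_'::t) = t by simp]
        rw [ih t (['_'].reverse ++ acc) ht]
        simp [pvRep]
      · have hp : (['_','_'].isPrefixOf (a :: b :: t)) = false := by
          simp [List.isPrefixOf]
          intro ha hb; exact absurd ⟨ha.symm, hb.symm⟩ hab
        simp only [hp, Bool.false_eq_true, if_false]
        rw [ih (b :: t) (a :: acc) (by simp at h ⊢; omega)]
        simp [pvRep, hab]

theorem pvReplace_eq_rep (l : List Char) :
    PySem.Chars.replace l ['_','_'] ['_'] = pvRep l := by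
  rw [PySem.Chars.replace]
  simp [pvRep_go_eq l.length l [] (le_refl _)]

theorem pvRep_length_le (l : List Char) : (pvRep l).length ≤ l.length := by
  induction l using pvRep.induct with
  | case1 => simp [pvRep]
  | case2 c => simp [pvRep]
  | case3 a b t h ih => simp [pvRep, h]; omega
  | case4 a b t h ih => simp [pvRep, h]; simpa using ih

theorem pvRep_length_lt (l : List Char) (h : ['_','_'] <:+: l) :
    (pvRep l).length < l.length := by
  induction l using pvRep.induct with
  | case1 => simp at h
  | case2 c =>
    have := h.length_le; simp at this
  | case3 a b t hab ih =>
    have := pvRep_length_le t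
    simp [pvRep, hab]; omega
  | case4 a b t hab ih =>
    rcases List.infix_cons_iff.mp h with hpre | hinf
    · rcases List.cons_prefix_cons.mp hpre with ⟨ha, hpre2⟩
      rcases List.cons_prefix_cons.mp hpre2 with ⟨hb, _⟩
      exact absurd ⟨ha.symm, hb.symm⟩ hab
    · have := ih hinf
      simp [pvRep, hab]; simp at this; omega

-- A's `while "__" in token: token = token.replace("__", "_")`  (['_','_'] = "__", ['_'] = "_")
def collapseLoop (token : List Char) : List Char :=
  if h : PySem.Chars.isIn ['_','_'] token = true then
    collapseLoop (PySem.Chars.replace token ['_','_'] ['_'])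
  else token
termination_by token.length
decreasing_by
  rw [pvReplace_eq_rep]
  exact pvRep_length_lt _ ((PySem.Chars.isIn_iff_infix _ _).mp h)

def artifact_token_py (value : String) : String :=
  -- chars: one output char per char of str(value).strip().lower()
  let chars : List Char :=
    (PySem.Str.lower (PySem.Str.strip value)).toList.foldl
      (fun acc char => if PySem.Chars.isalnum char then acc ++ [char] else acc ++ ['_']) []
  -- token = "".join(chars).strip("_")
  let token : List Char := PySem.Chars.stripChars chars ['_']
  String.ofList (collapseLoop token)

-- ===== PORT B =====
def artifact_token_py_alt (value : String) : String :=
  let st :=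
    (PySem.Str.lower (PySem.Str.strip value)).toList.foldl
      (fun (st : List (List Char) × List Char) (char : Char) =>
        if PySem.Chars.isalnum char then (st.1, st.2 ++ [char])
        else if st.2.isEmpty then st
        else (st.1 ++ [st.2], ([] : List Char)))
      ([], [])
  let words : List (List Char) := if st.2.isEmpty then st.1 else st.1 ++ [st.2]
  String.ofList (PySem.Chars.join ['_'] words)

-- ===== PRECONDITION & SPEC =====
def Spec_artifact_token_py (value : String) (out : String) : Prop := out = artifact_token_py_alt value
instance (value : String) (out : String) : Decidable (Spec_artifact_token_py value out) := by unfold Spec_artifact_token_py; infer_instance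

-- ===== CLAIM (what is proved, stated in full; the proofs are below) =====
def Claim_equal_artifact_token_py : Prop := ∀ (value : String), Dom_artifact_token_py value → Spec_artifact_token_py value (artifact_token_py value)

-- ===== LEMMAS AND PROOFS =====
def pvSq : List Char → List Char
  | [] => []
  | [c] => [c]
  | a :: b :: t => if a = '_' ∧ b = '_' then pvSq (b :: t) else a :: pvSq (b :: t)

theorem pvSq_cons_rep (l : List Char) : ∀ c, pvSq (c :: pvRep l) = pvSq (c :: l) := by
  induction l using pvRep.induct with
  | case1 => intro c; simp [pvRep]
  | case2 d => intro c; simp [pvRep]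
  | case3 a b t hab ih =>
    intro c
    obtain ⟨ha, hb⟩ := hab; subst ha; subst hb
    show pvSq (c :: '_' :: pvRep t) = pvSq (c :: '_' :: '_' :: t)
    by_cases hc : c = '_'
    · subst hc
      rw [show pvSq ('_' :: '_' :: pvRep t) = pvSq ('_' :: pvRep t) by simp [pvSq]]
      rw [show pvSq ('_' :: '_' :: '_' :: t) = pvSq ('_' :: '_' :: t) by simp [pvSq]]
      rw [show pvSq ('_' :: '_' :: t) = pvSq ('_' :: t) by simp [pvSq]]
      exact ih '_'
    · rw [show pvSq (c :: '_' :: pvRep t) = c :: pvSq ('_' :: pvRep t) by simp [pvSq, hc]]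
      rw [show pvSq (c :: '_' :: '_' :: t) = c :: pvSq ('_' :: '_' :: t) by simp [pvSq, hc]]
      rw [show pvSq ('_' :: '_' :: t) = pvSq ('_' :: t) by simp [pvSq]]
      rw [ih '_']
  | case4 a b t hab ih =>
    intro c
    show pvSq (c :: pvRep (a :: b :: t)) = pvSq (c :: a :: b :: t)
    rw [show pvRep (a :: b :: t) = a :: pvRep (b :: t) by simp [pvRep, hab]]
    by_cases hca : c = '_' ∧ a = '_'
    · rw [show pvSq (c :: a :: pvRep (b :: t)) = pvSq (a :: pvRep (b :: t)) by simp [pvSq, hca]]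
      rw [show pvSq (c :: a :: b :: t) = pvSq (a :: b :: t) by simp [pvSq, hca]]
      exact ih a
    · rw [show pvSq (c :: a :: pvRep (b :: t)) = c :: pvSq (a :: pvRep (b :: t)) by simp [pvSq, hca]]
      rw [show pvSq (c :: a :: b :: t) = c :: pvSq (a :: b :: t) by simp [pvSq, hca]]
      rw [ih a]

theorem pvSq_rep (l : List Char) : pvSq (pvRep l) = pvSq l := by
  match l with
  | [] => rfl
  | [c] => rfl
  | a :: b :: t =>
    by_cases hab : a = '_' ∧ b = '_'
    · obtain ⟨ha, hb⟩ := hab; subst ha; subst hb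
      rw [show pvRep ('_' :: '_' :: t) = '_' :: pvRep t by simp [pvRep]]
      rw [pvSq_cons_rep t '_']
      rw [show pvSq ('_' :: '_' :: t) = pvSq ('_' :: t) by simp [pvSq]]
    · rw [show pvRep (a :: b :: t) = a :: pvRep (b :: t) by simp [pvRep, hab]]
      rw [pvSq_cons_rep (b :: t) a]

theorem pvSq_noAdj (l : List Char) (h : ¬ ['_','_'] <:+: l) : pvSq l = l := by
  induction l using pvSq.induct with
  | case1 => rfl
  | case2 c => rfl
  | case3 a b t hab ih =>
    obtain ⟨ha, hb⟩ := hab; subst ha; subst hb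
    exact absurd (List.IsPrefix.isInfix ⟨t, rfl⟩) h
  | case4 a b t hab ih =>
    have : ¬ ['_','_'] <:+: (b :: t) := fun hx => h (List.infix_cons_iff.mpr (Or.inr hx))
    rw [show pvSq (a :: b :: t) = a :: pvSq (b :: t) by simp [pvSq, hab]]
    rw [ih this]

theorem pvLoop_eq_sq (l : List Char) : collapseLoop l = pvSq l := by
  generalize hn : l.length = n
  induction n using Nat.strong_induction_on generalizing l with
  | _ n ih =>
    rw [collapseLoop]
    by_cases h : PySem.Chars.isIn ['_','_'] l = true
    · rw [dif_pos h, pvReplace_eq_rep]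
      have hlt : (pvRep l).length < n := hn ▸ pvRep_length_lt l ((PySem.Chars.isIn_iff_infix _ _).mp h)
      rw [ih (pvRep l).length hlt (pvRep l) rfl, pvSq_rep]
    · rw [dif_neg h]
      have : ¬ ['_','_'] <:+: l := by
        intro hx
        exact h ((PySem.Chars.isIn_iff_infix _ _).mpr hx)
      exact (pvSq_noAdj l this).symm

def pvWords : List Char → List (List Char)
  | [] => []
  | c :: t =>
    if c = '_' then pvWords t
    else (c :: t.takeWhile (· != '_')) :: pvWords (t.dropWhile (· != '_'))
termination_by l => l.length
decreasing_by
  · simp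
  · have := List.length_dropWhile_le (p := (· != '_')) (l := t); simp; omega

def pvLstrip (l : List Char) : List Char := l.dropWhile (· == '_')

def pvRstrip (l : List Char) : List Char := (l.reverse.dropWhile (· == '_')).reverse

def pvPref (x : List Char) : List Char :=
  if x.head? = some '_' ∧ pvWords x ≠ [] then ['_'] else []

theorem pvStripChars_eq (l : List Char) :
    PySem.Chars.stripChars l ['_'] = pvRstrip (pvLstrip l) := by
  have hf : (fun c => (['_'] : List Char).contains c) = (fun c : Char => c == '_') := by
    funext c; simp only [List.contains_cons, List.contains_nil, Bool.or_false]
  simp only [PySem.Chars.stripChars, hf, pvRstrip, pvLstrip]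

theorem pvWords_nil : pvWords [] = [] := by rw [pvWords]

theorem pvWords_us (t : List Char) : pvWords ('_' :: t) = pvWords t := by
  rw [pvWords, if_pos rfl]

theorem pvWords_cons (c : Char) (t : List Char) (hc : c ≠ '_') :
    pvWords (c :: t) = (c :: t.takeWhile (· != '_')) :: pvWords (t.dropWhile (· != '_')) := by
  rw [pvWords, if_neg hc]

theorem pvWords_nil_iff (x : List Char) : pvWords x = [] ↔ ∀ c ∈ x, c = '_' := by
  induction x using pvWords.induct with
  | case1 => simp [pvWords_nil]
  | case2 t ih => rw [pvWords_us]; simp [ih]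
  | case3 c t hc ih => rw [pvWords_cons c t hc]; simp [hc]

theorem pvWords_lstrip (x : List Char) : pvWords (pvLstrip x) = pvWords x := by
  induction x with
  | nil => rfl
  | cons c t ih =>
    by_cases hc : c = '_'
    · subst hc
      rw [show pvLstrip ('_' :: t) = pvLstrip t by simp [pvLstrip, List.dropWhile_cons]]
      rw [ih, pvWords_us]
    · rw [show pvLstrip (c :: t) = c :: t by simp [pvLstrip, List.dropWhile_cons, hc]]

theorem pvSq_append_no_us (w : List Char) : ∀ y, (∀ a ∈ w, a ≠ '_') →
    pvSq (w ++ y) = w ++ pvSq y := by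
  induction w with
  | nil => intro y _; rfl
  | cons a w' ih =>
    intro y h
    have ha : a ≠ '_' := h a (by simp)
    have h' : ∀ b ∈ w', b ≠ '_' := fun b hb => h b (by simp [hb])
    cases hwy : w' ++ y with
    | nil =>
      rcases List.append_eq_nil_iff.mp hwy with ⟨hw, hy⟩
      subst hw; subst hy; rfl
    | cons b z =>
      rw [List.cons_append, hwy]
      rw [show pvSq (a :: b :: z) = a :: pvSq (b :: z) by simp [pvSq, ha]]
      rw [← hwy, ih y h']; simp

theorem pvRstrip_all (x : List Char) (h : ∀ c ∈ x, c = '_') : pvRstrip x = [] := by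
  have : x.reverse.dropWhile (· == '_') = [] := by
    rw [List.dropWhile_eq_nil_iff]
    intro a ha; simp [h a (List.mem_reverse.mp ha)]
  simp [pvRstrip, this]

theorem pvRstrip_ne_nil (x : List Char) (h : ∃ c ∈ x, c ≠ '_') : pvRstrip x ≠ [] := by
  obtain ⟨c, hc, hne⟩ := h
  simp only [pvRstrip, ne_eq, List.reverse_eq_nil_iff]
  intro hd
  rw [List.dropWhile_eq_nil_iff] at hd
  have := hd c (List.mem_reverse.mpr hc)
  simp at this; exact hne this

theorem pvRstrip_cons (c : Char) (t : List Char) (h : ∃ d ∈ t, d ≠ '_') :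
    pvRstrip (c :: t) = c :: pvRstrip t := by
  have hne : ¬ (t.reverse.dropWhile (· == '_')).isEmpty = true := by
    simp only [List.isEmpty_iff]
    intro hd
    rw [List.dropWhile_eq_nil_iff] at hd
    obtain ⟨d, hdm, hdne⟩ := h
    have := hd d (List.mem_reverse.mpr hdm)
    simp at this; exact hdne this
  show ((c :: t).reverse.dropWhile (· == '_')).reverse = _
  rw [List.reverse_cons, List.dropWhile_append, if_neg hne]
  simp [pvRstrip]

theorem pvRstrip_append (w r : List Char) (hw : ∀ a ∈ w, a ≠ '_') (hne : w ≠ []) :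
    pvRstrip (w ++ r) = w ++ pvRstrip r := by
  have hwrev : w.reverse.dropWhile (· == '_') = w.reverse := by
    cases hw' : w.reverse with
    | nil => rfl
    | cons a u =>
      have ha : a ∈ w := by
        have : a ∈ w.reverse := by rw [hw']; simp
        exact List.mem_reverse.mp this
      rw [List.dropWhile_cons_of_neg]
      simp [hw a ha]
  show ((w ++ r).reverse.dropWhile (· == '_')).reverse = _
  rw [List.reverse_append, List.dropWhile_append]
  by_cases hre : (r.reverse.dropWhile (· == '_')).isEmpty = true
  · rw [if_pos hre, hwrev]
    have : pvRstrip r = [] := by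
      simp only [pvRstrip]
      simp only [List.isEmpty_iff] at hre
      rw [hre]; rfl
    simp [this]
  · rw [if_neg hre]
    simp [pvRstrip]

theorem pvRstrip_prefix (t : List Char) : pvRstrip t <+: t := by
  have h1 : t.reverse.dropWhile (· == '_') <:+ t.reverse := List.dropWhile_suffix _
  have := List.IsSuffix.reverse h1
  simpa [pvRstrip] using this

theorem pvRstrip_head? (t : List Char) (h : pvRstrip t ≠ []) :
    (pvRstrip t).head? = t.head? := by
  obtain ⟨s, hs⟩ := pvRstrip_prefix t
  cases hx : pvRstrip t with
  | nil => exact absurd hx h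
  | cons a u => rw [← hs, hx]; simp

theorem pvG (x : List Char) :
    pvSq (pvRstrip x) = pvPref x ++ PySem.Chars.join ['_'] (pvWords x) := by
  induction x using pvWords.induct with
  | case1 =>
    simp [pvRstrip, pvPref, pvWords_nil, PySem.Chars.join_nil, pvSq]
  | case2 t ih =>
    by_cases hw : pvWords t = []
    · have hall : ∀ c ∈ ('_' :: t), c = '_' := by
        intro c hc
        rcases List.mem_cons.mp hc with h | h
        · exact h
        · exact (pvWords_nil_iff t).mp hw c h
      rw [pvRstrip_all _ hall]
      have : pvPref ('_' :: t) = [] := by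
        simp [pvPref, pvWords_us, hw]
      rw [this, pvWords_us, hw, PySem.Chars.join_nil]
      rfl
    · have hex : ∃ d ∈ t, d ≠ '_' := by
        by_contra hc
        push_neg at hc
        exact hw ((pvWords_nil_iff t).mpr hc)
      rw [pvRstrip_cons _ _ hex]
      have hrne : pvRstrip t ≠ [] := pvRstrip_ne_nil t hex
      have hpref : pvPref ('_' :: t) = ['_'] := by
        simp [pvPref, pvWords_us, hw]
      rw [hpref, pvWords_us]
      cases hrt : pvRstrip t with
      | nil => exact absurd hrt hrne
      | cons a rest =>
        have hth : t.head? = some a := by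
          rw [← pvRstrip_head? t hrne, hrt]; rfl
        rw [hrt] at ih
        by_cases hc : a = '_'
        · subst hc
          rw [show pvSq ('_' :: '_' :: rest) = pvSq ('_' :: rest) by simp [pvSq]]
          rw [ih]
          have : pvPref t = ['_'] := by
            simp [pvPref, hw, hth]
          rw [this]
        · rw [show pvSq ('_' :: a :: rest) = '_' :: pvSq (a :: rest) by simp [pvSq, hc]]
          rw [ih]
          have : pvPref t = [] := by
            simp [pvPref, hw, hth]
            intro h; exact absurd h hc
          rw [this]; rfl
  | case3 c t hc ih =>
    have hsplit : c :: t = (c :: t.takeWhile (· != '_')) ++ t.dropWhile (· != '_') := by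
      simp [List.takeWhile_append_dropWhile]
    set w := c :: t.takeWhile (· != '_') with hw_def
    set r := t.dropWhile (· != '_') with hr_def
    have hw_all : ∀ a ∈ w, a ≠ '_' := by
      intro a ha
      rcases List.mem_cons.mp ha with h | h
      · subst h; exact hc
      · have := List.mem_takeWhile_imp h
        simpa using this
    have hLHS : pvSq (pvRstrip (c :: t)) = w ++ pvSq (pvRstrip r) := by
      rw [hsplit, pvRstrip_append w r hw_all (by simp [hw_def])]
      exact pvSq_append_no_us w (pvRstrip r) hw_all
    have hpref : pvPref (c :: t) = [] := by
      simp [pvPref, hc]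
    rw [hLHS, ih, hpref, pvWords_cons c t hc, ← hw_def, ← hr_def]
    by_cases hr : pvWords r = []
    · have : pvPref r = [] := by simp [pvPref, hr]
      rw [hr, this, PySem.Chars.join_nil, PySem.Chars.join_singleton]
      simp
    · cases hrl : r with
      | nil => rw [hrl] at hr; exact absurd pvWords_nil hr
      | cons d r' =>
        have hd : d = '_' := by
          have := List.head?_dropWhile_not (· != '_') t
          rw [← hr_def, hrl] at this
          simpa using this
        subst hd
        rw [hrl] at hr
        rw [pvWords_us] at hr
        have hprefr : pvPref ('_' :: r') = ['_'] := by
          simp [pvPref, pvWords_us, hr]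
        rw [hprefr]
        rw [pvWords_us]
        cases hwr : pvWords r' with
        | nil => exact absurd hwr hr
        | cons wr more =>
          rw [PySem.Chars.join_cons_cons]
          simp

def pvPhi (c : Char) : Char := if PySem.Chars.isalnum c then c else '_'

theorem pvAlnum_ne_us (c : Char) (h : PySem.Chars.isalnum c = true) : c ≠ '_' := by
  intro he; subst he
  exact absurd h (by decide)

theorem pvTW (u : List Char) (hu : ∀ a ∈ u, a ≠ '_') : ∀ y,
    (u ++ '_' :: y).takeWhile (· != '_') = u ∧ (u ++ '_' :: y).dropWhile (· != '_') = '_' :: y := by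
  induction u with
  | nil => intro y; simp
  | cons a u' ih =>
    intro y
    have ha : a ≠ '_' := hu a (by simp)
    have h' : ∀ b ∈ u', b ≠ '_' := fun b hb => hu b (by simp [hb])
    obtain ⟨h1, h2⟩ := ih h' y
    constructor
    · rw [List.cons_append, List.takeWhile_cons_of_pos (by simpa using ha), h1]
    · rw [List.cons_append, List.dropWhile_cons_of_pos (by simpa using ha), h2]

theorem pvWords_run (u y : List Char) (hu : ∀ a ∈ u, a ≠ '_') (hne : u ≠ []) :
    pvWords (u ++ '_' :: y) = u :: pvWords y := by
  cases u with
  | nil => exact absurd rfl hne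
  | cons c u' =>
    have hc : c ≠ '_' := hu c (by simp)
    have h' : ∀ b ∈ u', b ≠ '_' := fun b hb => hu b (by simp [hb])
    obtain ⟨h1, h2⟩ := pvTW u' h' y
    rw [List.cons_append, pvWords_cons c _ hc, h1, h2, pvWords_us]

theorem pvWords_all (u : List Char) (hu : ∀ a ∈ u, a ≠ '_') (hne : u ≠ []) :
    pvWords u = [u] := by
  cases u with
  | nil => exact absurd rfl hne
  | cons c u' =>
    have hc : c ≠ '_' := hu c (by simp)
    have h' : ∀ b ∈ u', b ≠ '_' := fun b hb => hu b (by simp [hb])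
    rw [pvWords_cons c _ hc]
    have h1 : u'.takeWhile (· != '_') = u' := by
      rw [List.takeWhile_eq_self_iff]
      intro a ha; simpa using h' a ha
    have h2 : u'.dropWhile (· != '_') = [] := by
      rw [List.dropWhile_eq_nil_iff]
      intro a ha; simpa using h' a ha
    rw [h1, h2, pvWords_nil]

theorem pvFoldA (cs : List Char) : ∀ acc,
    cs.foldl (fun acc char => if PySem.Chars.isalnum char then acc ++ [char] else acc ++ ['_']) acc
      = acc ++ cs.map pvPhi := by
  induction cs with
  | nil => intro acc; simp
  | cons c t ih =>
    intro acc
    by_cases hc : PySem.Chars.isalnum c = true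
    · simp only [List.foldl_cons, hc, if_true, List.map_cons, ih, pvPhi]
      simp [hc]
    · simp only [List.foldl_cons, hc, if_false, List.map_cons, ih, pvPhi]
      simp [hc]

theorem pvFoldB (cs : List Char) : ∀ (ws : List (List Char)) (cur : List Char),
    (∀ a ∈ cur, a ≠ '_') →
    (if (cs.foldl
        (fun (st : List (List Char) × List Char) (char : Char) =>
          if PySem.Chars.isalnum char then (st.1, st.2 ++ [char])
          else if st.2.isEmpty then st
          else (st.1 ++ [st.2], ([] : List Char)))
        (ws, cur)).2.isEmpty
     then (cs.foldl
        (fun (st : List (List Char) × List Char) (char : Char) =>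
          if PySem.Chars.isalnum char then (st.1, st.2 ++ [char])
          else if st.2.isEmpty then st
          else (st.1 ++ [st.2], ([] : List Char)))
        (ws, cur)).1
     else (cs.foldl
        (fun (st : List (List Char) × List Char) (char : Char) =>
          if PySem.Chars.isalnum char then (st.1, st.2 ++ [char])
          else if st.2.isEmpty then st
          else (st.1 ++ [st.2], ([] : List Char)))
        (ws, cur)).1 ++ [(cs.foldl
        (fun (st : List (List Char) × List Char) (char : Char) =>
          if PySem.Chars.isalnum char then (st.1, st.2 ++ [char])
          else if st.2.isEmpty then st
          else (st.1 ++ [st.2], ([] : List Char)))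
        (ws, cur)).2])
      = ws ++ pvWords (cur ++ cs.map pvPhi) := by
  induction cs with
  | nil =>
    intro ws cur hcur
    simp only [List.foldl_nil, List.map_nil, List.append_nil]
    cases hc : cur with
    | nil => simp [pvWords_nil]
    | cons a u =>
      rw [← hc]
      have : cur.isEmpty = false := by rw [hc]; rfl
      rw [this]
      simp only [Bool.false_eq_true, if_false]
      rw [pvWords_all cur hcur (by rw [hc]; simp)]
  | cons c t ih =>
    intro ws cur hcur
    by_cases hc : PySem.Chars.isalnum c = true
    · simp only [List.foldl_cons, hc, if_true]
      have hcur' : ∀ a ∈ cur ++ [c], a ≠ '_' := by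
        intro a ha
        rcases List.mem_append.mp ha with h | h
        · exact hcur a h
        · simp at h; subst h; exact pvAlnum_ne_us _ hc
      rw [ih ws (cur ++ [c]) hcur']
      have : pvPhi c = c := by simp [pvPhi, hc]
      rw [List.map_cons, this]
      simp
    · simp only [List.foldl_cons, hc, Bool.false_eq_true, if_false]
      have hphi : pvPhi c = '_' := by simp [pvPhi, hc]
      rw [List.map_cons, hphi]
      cases hcu : cur with
      | nil =>
        simp only [List.isEmpty_nil, if_true]
        rw [ih ws [] (by simp)]
        simp [pvWords_us]
      | cons a u =>
        rw [← hcu]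
        have hne : cur.isEmpty = false := by rw [hcu]; rfl
        rw [hne]
        simp only [Bool.false_eq_true, if_false]
        rw [ih (ws ++ [cur]) [] (by simp)]
        rw [pvWords_run cur (List.map pvPhi t) hcur (by rw [hcu]; simp)]
        simp

theorem pvPref_lstrip (m : List Char) : pvPref (pvLstrip m) = [] := by
  unfold pvPref
  rw [if_neg]
  rintro ⟨h1, _⟩
  have h := List.head?_dropWhile_not (· == '_') m
  rw [show (List.dropWhile (· == '_') m) = pvLstrip m from rfl, h1] at h
  simp at h

theorem pvMain (cs : List Char) :
    collapseLoop (PySem.Chars.stripChars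
      (cs.foldl (fun acc char => if PySem.Chars.isalnum char then acc ++ [char] else acc ++ ['_']) []) ['_'])
    = PySem.Chars.join ['_']
      (if (cs.foldl
          (fun (st : List (List Char) × List Char) (char : Char) =>
            if PySem.Chars.isalnum char then (st.1, st.2 ++ [char])
            else if st.2.isEmpty then st
            else (st.1 ++ [st.2], ([] : List Char)))
          ([], [])).2.isEmpty
       then (cs.foldl
          (fun (st : List (List Char) × List Char) (char : Char) =>
            if PySem.Chars.isalnum char then (st.1, st.2 ++ [char])
            else if st.2.isEmpty then st
            else (st.1 ++ [st.2], ([] : List Char)))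
          ([], [])).1
       else (cs.foldl
          (fun (st : List (List Char) × List Char) (char : Char) =>
            if PySem.Chars.isalnum char then (st.1, st.2 ++ [char])
            else if st.2.isEmpty then st
            else (st.1 ++ [st.2], ([] : List Char)))
          ([], [])).1 ++ [(cs.foldl
          (fun (st : List (List Char) × List Char) (char : Char) =>
            if PySem.Chars.isalnum char then (st.1, st.2 ++ [char])
            else if st.2.isEmpty then st
            else (st.1 ++ [st.2], ([] : List Char)))
          ([], [])).2]) := by
  rw [pvFoldA cs [], List.nil_append]
  rw [pvStripChars_eq, pvLoop_eq_sq, pvG, pvPref_lstrip, pvWords_lstrip, List.nil_append]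
  rw [pvFoldB cs [] [] (by simp)]
  simp

-- ===== VERDICT (by name: the statement is the Claim_ definition above) =====
theorem artifact_token_py_spec : Claim_equal_artifact_token_py := by
  intro value _
  unfold Spec_artifact_token_py artifact_token_py artifact_token_py_alt
  exact congrArg String.ofList (pvMain _)
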